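-- pv_equiv track=rewrite | github.com/Devlar-Technologies/ai-workforce | tools/firecrawl_tool.py | _extract_value_proposition
-- ===== SOURCE A (Python) =====
-- def _extract_value_proposition(content: str) -> str:
--     """Extract main value proposition"""
--     # Look for value prop indicators
--     value_indicators = [
--         "why choose",
--         "benefits",
--         "value proposition",
--         "what makes us",
--         "our advantage"
--     ]
--
--     content_lower = content.lower()
--     lines = content.split('\n')
--
--     for i, line in enumerate(lines):
--         if any(indicator in line.lower() for indicator in value_indicators):
--             # Return next few lines as value prop
--             return '\n'.join(lines[i:i+3])
--
--     # Fallback: return first substantial paragraph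
--     for line in lines:
--         if len(line) > 100:
--             return line[:300] + "..."
--
--     return "Value proposition not clearly identified"
-- ===== SOURCE B (Python) =====
-- def _extract_value_proposition(content: str) -> str:
--     """Extract main value proposition (single combined pass)."""
--     value_indicators = [
--         "why choose",
--         "benefits",
--         "value proposition",
--         "what makes us",
--         "our advantage",
--     ]
--     lines = content.split('\n')
--     ind_idx = None
--     long_idx = None
--     for i, line in enumerate(lines):
--         low = line.lower()
--         if any(indicator in low for indicator in value_indicators):
--             ind_idx = i
--             break
--         if long_idx is None and len(line) > 100:
--             long_idx = i
--     if ind_idx is not None: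
--         return '\n'.join(lines[ind_idx:ind_idx + 3])
--     if long_idx is not None:
--         return lines[long_idx][:300] + "..."
--     return "Value proposition not clearly identified"
-- ===== Notes on version B (the rewrite author's own statement) =====
-- stated objective: alternative
-- what changed: A makes two sequential full scans of the lines (one for indicator substrings, a second fallback scan for a line longer than 100 chars); B makes one combined pass maintaining an early-exit indicator hit and the first long-line index, deciding after the loop.
import Mathlib
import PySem

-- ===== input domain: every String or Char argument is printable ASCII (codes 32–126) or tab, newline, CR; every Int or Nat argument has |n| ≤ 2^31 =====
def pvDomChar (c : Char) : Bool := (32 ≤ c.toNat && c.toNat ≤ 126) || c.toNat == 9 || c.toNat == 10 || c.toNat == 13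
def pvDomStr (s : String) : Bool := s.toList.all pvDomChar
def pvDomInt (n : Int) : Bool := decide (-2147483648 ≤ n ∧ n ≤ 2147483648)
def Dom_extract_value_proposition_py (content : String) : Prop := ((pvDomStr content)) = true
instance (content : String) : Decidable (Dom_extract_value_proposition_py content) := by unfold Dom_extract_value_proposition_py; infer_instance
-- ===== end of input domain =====

-- B replaces A's two sequential scans over the lines (indicator scan, then a full fallback
-- scan for the first >100-char line) by ONE combined pass with an early exit on an indicator
-- hit and a post-loop decision; objective: alternative decomposition (same asymptotic cost).

-- the shared constant list of indicator substrings
def pvIndicators : List String :=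
  ["why choose", "benefits", "value proposition", "what makes us", "our advantage"]

-- "any(indicator in line.lower() for indicator in value_indicators)"
def pvHasInd (l : String) : Bool :=
  pvIndicators.any (fun ind => PySem.Str.isIn ind (PySem.Str.lower l))

-- ===== PORT A =====
-- A's first loop: "for i, line in enumerate(lines): if any(...): return '\n'.join(lines[i:i+3])"
def pvALoop1 (all : List String) (rest : List String) (i : Nat) : Option String :=
  match rest with
  | [] => none
  | l :: t =>
    if pvHasInd l then
      some (PySem.Str.join "\n" (PySem.List.slice all (some (i : Int)) (some ((i : Int) + 3))))
    else pvALoop1 all t (i + 1)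

-- A's fallback loop: "for line in lines: if len(line) > 100: return line[:300] + '...'"
def pvALoop2 (rest : List String) : Option String :=
  match rest with
  | [] => none
  | l :: t =>
    if 100 < PySem.Str.len l then
      some (PySem.Str.slice l none (some 300) ++ "...")
    else pvALoop2 t

-- A's body after the split
def pvARun (lines : List String) : String :=
  match pvALoop1 lines lines 0 with
  | some s => s
  | none =>
    match pvALoop2 lines with
    | some s => s
    | none => "Value proposition not clearly identified"

def extract_value_proposition_py (content : String) : String :=
  let _content_lower := PySem.Str.lower content  -- computed and unused in A
  pvARun ((PySem.Str.split? content "\n").getD [])  -- sep = "\n" is nonempty so split? is always `some`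

-- ===== PORT B =====
-- B's single combined pass: early exit with the indicator index, else record first long-line index
def pvBLoop (rest : List String) (i : Nat) (longIdx : Option Nat) : Option Nat × Option Nat :=
  match rest with
  | [] => (none, longIdx)
  | l :: t =>
    if pvHasInd l then (some i, longIdx)
    else
      pvBLoop t (i + 1)
        (if longIdx.isNone && decide (100 < PySem.Str.len l) then some i else longIdx)

-- B's post-loop decision
def pvBRun (lines : List String) : String :=
  match pvBLoop lines 0 none with
  | (some k, _) =>
      PySem.Str.join "\n" (PySem.List.slice lines (some (k : Int)) (some ((k : Int) + 3)))
  | (none, some j) => PySem.Str.slice (lines.getD j "") none (some 300) ++ "..."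
  | (none, none) => "Value proposition not clearly identified"

def extract_value_proposition_py_alt (content : String) : String :=
  pvBRun ((PySem.Str.split? content "\n").getD [])  -- sep = "\n" is nonempty so split? is always `some`

-- ===== PRECONDITION & SPEC =====
def Spec_extract_value_proposition_py (content : String) (out : String) : Prop := out = extract_value_proposition_py_alt content
instance (content : String) (out : String) : Decidable (Spec_extract_value_proposition_py content out) := by unfold Spec_extract_value_proposition_py; infer_instance

-- ===== CLAIM (what is proved, stated in full; the proofs are below) =====
def Claim_equal_extract_value_proposition_py : Prop := ∀ (content : String), Dom_extract_value_proposition_py content → Spec_extract_value_proposition_py content (extract_value_proposition_py content)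

-- ===== LEMMAS AND PROOFS =====

-- "line is long" predicate of both fallbacks, on the Nat length
def pvLong (l : String) : Bool := decide (100 < l.length)

theorem pvLen_iff (l : String) : 100 < PySem.Str.len l ↔ 100 < l.length := by
  rw [PySem.Str.len_eq]; exact_mod_cast Iff.rfl

-- A's first loop returns the slice at the first indicator index
theorem pvALoop1_eq (rest : List String) : ∀ (all : List String) (i : Nat),
    pvALoop1 all rest i =
      (List.findIdx? pvHasInd rest).map
        (fun k => PySem.Str.join "\n"
          (PySem.List.slice all (some ((i + k : Nat) : Int)) (some (((i + k : Nat) : Int) + 3)))) := by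
  induction rest with
  | nil => intro all i; simp [pvALoop1]
  | cons l t ih =>
    intro all i
    rw [pvALoop1, List.findIdx?_cons]
    by_cases h : pvHasInd l
    · simp [h]
    · simp only [h, Bool.false_eq_true, ite_false, ih]
      cases hf : List.findIdx? pvHasInd t with
      | none => simp
      | some k =>
        simp only [Option.map_some]
        have : i + 1 + k = i + (k + 1) := by omega
        rw [this]

-- A's fallback loop returns the trimmed first long line
theorem pvALoop2_eq (rest : List String) :
    pvALoop2 rest =
      (rest.find? pvLong).map (fun l => PySem.Str.slice l none (some 300) ++ "...") := by
  induction rest with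
  | nil => simp [pvALoop2]
  | cons l t ih =>
    rw [pvALoop2, List.find?_cons]
    by_cases h : 100 < l.length
    · simp [pvLong, h]
    · simp [pvLong, h, ih]

-- once the long-line index is recorded, B's loop keeps it and only hunts for an indicator
theorem pvBLoop_keep (rest : List String) : ∀ (i j : Nat),
    pvBLoop rest i (some j) = ((List.findIdx? pvHasInd rest).map (i + ·), some j) := by
  induction rest with
  | nil => intro i j; simp [pvBLoop]
  | cons l t ih =>
    intro i j
    rw [pvBLoop, List.findIdx?_cons]
    by_cases h : pvHasInd l
    · simp [h]
    · simp only [h, Bool.false_eq_true, ite_false, Option.isNone_some, Bool.false_and, ih]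
      cases hf : List.findIdx? pvHasInd t with
      | none => simp
      | some k =>
        simp only [Option.map_some, Prod.mk.injEq, and_true, Option.some.injEq]
        omega

-- B's loop from the empty accumulator: first component is the first indicator index;
-- if there is none, the second component is the first long-line index
theorem pvBLoop_none (rest : List String) : ∀ (i : Nat),
    (pvBLoop rest i none).1 = (List.findIdx? pvHasInd rest).map (i + ·) ∧
    (List.findIdx? pvHasInd rest = none →
      (pvBLoop rest i none).2 = (List.findIdx? pvLong rest).map (i + ·)) := by
  induction rest with
  | nil => intro i; simp [pvBLoop]
  | cons l t ih =>
    intro i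
    rw [pvBLoop, List.findIdx?_cons]
    by_cases h : pvHasInd l
    · simp [h]
    · simp only [h, Bool.false_eq_true, ite_false, Option.isNone_none, Bool.true_and]
      by_cases hl : 100 < l.length
      · have hd : decide (100 < PySem.Str.len l) = true := decide_eq_true ((pvLen_iff l).mpr hl)
        have hq : pvLong l = true := by simp [pvLong, hl]
        simp only [hd, ite_true, pvBLoop_keep]
        refine ⟨?_, fun _ => by simp [List.findIdx?_cons, hq]⟩
        cases hf : List.findIdx? pvHasInd t with
        | none => simp
        | some k => simp only [Option.map_some, Option.some.injEq]; omega
      · have hd : decide (100 < PySem.Str.len l) = false :=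
          decide_eq_false (fun hc => hl ((pvLen_iff l).mp hc))
        have hq : pvLong l = false := by simp [pvLong, hl]
        simp only [hd, Bool.false_eq_true, ite_false]
        obtain ⟨ih1, ih2⟩ := ih (i + 1)
        refine ⟨?_, ?_⟩
        · rw [ih1]
          cases hf : List.findIdx? pvHasInd t with
          | none => simp
          | some k => simp only [Option.map_some, Option.some.injEq]; omega
        · intro hn
          cases hf : List.findIdx? pvHasInd t with
          | some k => simp [hf] at hn
          | none =>
            rw [ih2 hf, List.findIdx?_cons]
            simp only [hq, Bool.false_eq_true, ite_false]
            cases hg : List.findIdx? pvLong t with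
            | none => simp
            | some k => simp only [Option.map_some, Option.some.injEq]; omega

-- the element at the first index satisfying p is exactly find?
theorem pv_findIdx?_getD (p : String → Bool) (xs : List String) (d : String) :
    (List.findIdx? p xs).map (fun j => xs.getD j d) = xs.find? p := by
  induction xs with
  | nil => simp
  | cons l t ih =>
    rw [List.findIdx?_cons, List.find?_cons]
    by_cases h : p l
    · simp [h]
    · simp only [h, Bool.false_eq_true, ite_false, Option.map_map]
      rw [← ih]
      cases hf : List.findIdx? p t <;> simp

-- the two bodies agree on any list of lines
theorem pvRun_eq (lines : List String) : pvARun lines = pvBRun lines := by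
  rw [pvARun, pvBRun, pvALoop1_eq]
  obtain ⟨hb1, hb2⟩ := pvBLoop_none lines 0
  rcases hB : pvBLoop lines 0 none with ⟨b1, b2⟩
  rw [hB] at hb1 hb2
  cases hf : List.findIdx? pvHasInd lines with
  | some k =>
    simp only [hf, Option.map_some] at hb1 ⊢
    simp only [hb1, Nat.zero_add]
  | none =>
    have hb2' := hb2 hf
    simp only [hf, Option.map_none] at hb1 ⊢
    rw [pvALoop2_eq, ← pv_findIdx?_getD pvLong lines ""]
    cases hg : List.findIdx? pvLong lines with
    | none => simp only [hg, Option.map_none] at hb2' ⊢; simp [hb1, hb2']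
    | some j =>
      simp only [hg, Option.map_some] at hb2' ⊢
      simp only [hb1, hb2', Nat.zero_add]

-- ===== VERDICT (by name: the statement is the Claim_ definition above) =====
theorem extract_value_proposition_py_spec : Claim_equal_extract_value_proposition_py := by
  intro content _
  unfold Spec_extract_value_proposition_py extract_value_proposition_py extract_value_proposition_py_alt
  exact pvRun_eq _
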